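-- pv_equiv track=rewrite | github.com/Ikerlb/kattis | aliens/binary_search.py | _try
-- ===== SOURCE A (Python) =====
-- def f(c):
--     return ord(c) - ord('a') + 1
--
-- def _hash(s, b, p):
--     h = 0
--     for i, c in enumerate(reversed(s)):
--         h = (h + (f(c) * pow(b, i, p)) % p) % p
--     return h
--
-- def hashes(s, k, b, p):
--     h = _hash(s[:k], b, p)
--     yield h
--     for i in range(k, len(s)):
--         h = (h - (f(s[i - k]) * pow(b, k - 1, p)) % p) % p
--         h = (h * b) % p
--         h = (h + f(s[i])) % p
--         yield h
--
-- def _try(s, k, m, b, p):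
--     d = {}
--     for i, h in enumerate(hashes(s, k, b, p)):
--         if h not in d:
--             d[h] = [1, i]
--         else:
--             d[h][0] += 1
--             d[h][1] = i
--
--     l = list(d.values())
--     l.sort(key = lambda x: (x[1], x[0]), reverse = True)
--
--     for freq, last in l:
--         if freq >= m:
--             return last
--     return None
-- ===== SOURCE B (Python) =====
-- def _try(s, k, m, b, p):
--     n = len(s)
--     pref = [0]
--     h = 0
--     for c in s:
--         h = (h * b + ord(c) - 96) % p
--         pref.append(h)
--     if n == 0 or k > n:
--         hs = [pref[n]]
--     else:
--         pw = pow(b, k, p)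
--         hs = [(pref[i + k] - pref[i] * pw) % p for i in range(n - k + 1)]
--     cnt = {}
--     for v in hs:
--         cnt[v] = cnt.get(v, 0) + 1
--     for i in range(len(hs) - 1, -1, -1):
--         if cnt[hs[i]] >= m:
--             return i
--     return None
-- ===== Notes on version B (the rewrite author's own statement) =====
-- stated objective: faster
-- what changed: B computes window hashes as prefix-hash differences (pref[i+k] - pref[i]*b^k mod p) over a single Horner prefix pass instead of A's rolling-hash generator, and replaces A's dict of mutable [freq, last-index] pairs plus descending (last, freq) sort with a one-pass frequency counter and a backward early-exit index scan.
import Mathlib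
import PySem

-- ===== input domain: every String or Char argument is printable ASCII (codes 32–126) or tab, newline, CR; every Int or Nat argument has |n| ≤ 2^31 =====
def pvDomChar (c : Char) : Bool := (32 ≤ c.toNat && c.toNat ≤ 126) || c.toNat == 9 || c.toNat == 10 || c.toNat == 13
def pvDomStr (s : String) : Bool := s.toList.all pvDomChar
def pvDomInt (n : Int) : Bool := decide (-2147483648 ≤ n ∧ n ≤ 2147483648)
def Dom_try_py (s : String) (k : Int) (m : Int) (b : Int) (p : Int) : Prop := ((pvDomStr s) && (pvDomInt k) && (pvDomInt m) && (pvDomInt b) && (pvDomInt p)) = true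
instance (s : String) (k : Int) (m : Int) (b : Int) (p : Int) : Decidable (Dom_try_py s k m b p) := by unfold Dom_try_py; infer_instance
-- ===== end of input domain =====

-- B computes the window hashes as prefix-hash differences over one Horner prefix pass (instead of
-- A's rolling-hash generator) and replaces A's dict of [freq, last-index] pairs + descending sort
-- by a frequency counter with a backward early-exit scan (measured faster in a timing run).

-- ===== PORT A =====
-- f(c) = ord(c) - ord('a') + 1
def pvF (c : Char) : Int := (c.toNat : Int) - 97 + 1

-- pow(b, e, p): exact whenever p ≠ 0 and, for e < 0, gcd(b, p) = 1 (else Python raises ValueError) — both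
-- guaranteed by Pre_ at every reached call.  A negative exponent means Python's modular inverse, computed
-- here from the Bézout coefficient (any Bézout x has b*x ≡ gcd = 1 (mod p), and x mod p is unique).
def pvPowMod (b : Int) (e : Int) (p : Int) : Int :=
  if e < 0 then PySem.Int.mod ((PySem.Int.mod (Int.gcdA b p) p) ^ (-e).toNat) p
  else PySem.Int.powMod b e.toNat p

-- _hash(s, b, p)
def pvHash (l : List Char) (b p : Int) : Int :=
  (PySem.List.enumerate l.reverse 0).foldl
    (fun h ic => PySem.Int.mod (h + PySem.Int.mod (pvF ic.2 * pvPowMod b ic.1 p) p) p) 0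

-- one iteration of the loop in hashes(); s[i-k] / s[i] are in range inside Pre_, so pyGetD is exact there
def pvHashStep (cs : List Char) (k b p : Int) (st : Int × List Int) (i : Int) : Int × List Int :=
  let h1 := PySem.Int.mod (st.1 - PySem.Int.mod (pvF (PySem.List.pyGetD cs (i - k) 'a') * pvPowMod b (k - 1) p) p) p
  let h2 := PySem.Int.mod (h1 * b) p
  let h3 := PySem.Int.mod (h2 + pvF (PySem.List.pyGetD cs i 'a')) p
  (h3, st.2 ++ [h3])

-- list(hashes(s, k, b, p)) (the generator, materialized in order)
def pvHashes (cs : List Char) (k b p : Int) : List Int :=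
  let h0 := pvHash (PySem.List.slice cs none (some k)) b p
  ((PySem.List.pyRange k (cs.length : Int) 1).foldl (pvHashStep cs k b p) (h0, [h0])).2

-- the dict-building step of _try: d[h] = [1, i] on a new key, else [d[h][0]+1, i]
-- (the Python 2-element int list is ported as Int × Int)
def pvStepA (d : PySem.Dict Int (Int × Int)) (ih : Int × Int) : PySem.Dict Int (Int × Int) :=
  match d.get? ih.2 with
  | none => d.insert ih.2 (1, ih.1)
  | some v => d.insert ih.2 (v.1 + 1, ih.1)

-- the final scan of _try: first (freq, last) with freq >= m
def pvFirstGe (m : Int) : List (Int × Int) → Option Int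
  | [] => none
  | v :: rest => if v.1 ≥ m then some v.2 else pvFirstGe m rest

def try_py (s : String) (k : Int) (m : Int) (b : Int) (p : Int) : Option Int :=
  let hs := pvHashes s.toList k b p
  let d := (PySem.List.enumerate hs 0).foldl pvStepA PySem.Dict.empty
  let l := PySem.List.sorted2 d.values (fun x => x.2) (fun x => x.1) true
  pvFirstGe m l

-- ===== PORT B =====
-- pref: Horner prefix hashes pref[j] = hash of s[:j], reduced mod p at every step
def pvPref (cs : List Char) (b p : Int) : List Int :=
  (cs.foldl (fun st c =>
      let h := PySem.Int.mod (st.1 * b + (c.toNat : Int) - 96) p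
      (h, st.2 ++ [h])) ((0 : Int), [(0 : Int)])).2

-- the list hs of window hashes: one window when the string is empty or shorter than k,
-- else prefix-hash differences pref[i+k] - pref[i]*b^k mod p.
-- pow(b, k, p) is ported for the k ≥ 0 that Pre_ admits (Python raises or inverts for k < 0).
def pvWindowHashes (cs : List Char) (k b p : Int) : List Int :=
  let n : Int := cs.length
  let pref := pvPref cs b p
  if n = 0 ∨ k > n then [PySem.List.pyGetD pref n 0]
  else
    let pw := PySem.Int.powMod b k.toNat p
    (PySem.List.pyRange 0 (n - k + 1) 1).map
      (fun i => PySem.Int.mod (PySem.List.pyGetD pref (i + k) 0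
        - PySem.List.pyGetD pref i 0 * pw) p)

def try_py_alt (s : String) (k : Int) (m : Int) (b : Int) (p : Int) : Option Int :=
  let hs := pvWindowHashes s.toList k b p
  let cnt := hs.foldl (fun d h => d.insert h (d.getD h 0 + 1)) PySem.Dict.empty
  (PySem.List.pyRange ((hs.length : Int) - 1) (-1) (-1)).find?
    (fun i => decide (cnt.getD (PySem.List.pyGetD hs i 0) 0 ≥ m))

-- ===== PRECONDITION & SPEC =====
-- Pre_ excludes exactly the inputs where A raises: k < 0 always runs the sliding window out of range
-- (IndexError, or ValueError in pow before it); p = 0 raises in pow once any character is hashed; and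
-- k = 0 with s ≠ '' asks pow for the modular inverse of b, a ValueError unless gcd(b, p) = 1.
def Pre_try_py (s : String) (k : Int) (m : Int) (b : Int) (p : Int) : Prop :=
  (1 ≤ k ∨ (k = 0 ∧ (s.toList = [] ∨ Int.gcd b p = 1))) ∧ (s.toList = [] ∨ p ≠ 0)
instance (s : String) (k : Int) (m : Int) (b : Int) (p : Int) : Decidable (Pre_try_py s k m b p) := by unfold Pre_try_py; infer_instance
def pvWitness_try_py : String × Int × Int × Int × Int := ("abcab", 2, 2, 31, 101)
def Spec_try_py (s : String) (k : Int) (m : Int) (b : Int) (p : Int) (out : Option Int) : Prop := out = try_py_alt s k m b p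
instance (s : String) (k : Int) (m : Int) (b : Int) (p : Int) (out : Option Int) : Decidable (Spec_try_py s k m b p out) := by unfold Spec_try_py; infer_instance

-- ===== CLAIM (what is proved, stated in full; the proofs are below) =====
def Claim_equal_try_py : Prop := ∀ (s : String) (k : Int) (m : Int) (b : Int) (p : Int), Dom_try_py s k m b p → Pre_try_py s k m b p → Spec_try_py s k m b p (try_py s k m b p)

-- ===== LEMMAS AND PROOFS =====

-- proof-layer: the Horner hash of one window (B computes these via prefix differences;
-- A's rolling stream and B's formula are both shown equal to this)
def pvWinHash (w : List Char) (b p : Int) : Int :=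
  w.foldl (fun h c => PySem.Int.mod (h * b + (c.toNat : Int) - 96) p) 0

-- ---- fmod (Python %) congruence toolkit ----
theorem pvModDef (a b : Int) : PySem.Int.mod a b = a.fmod b := rfl

theorem pvFmodEmod (a p : Int) : (a.fmod p) % p = a % p := by
  rw [Int.fmod_eq_emod]
  split
  · simp [Int.emod_emod_of_dvd _ dvd_rfl]
  · rw [Int.add_emod_right, Int.emod_emod_of_dvd _ dvd_rfl]

theorem pvFmodModEq (a p : Int) : a.fmod p ≡ a [ZMOD p] := pvFmodEmod a p

theorem pvFmodCongr {a a' p : Int} (h : a ≡ a' [ZMOD p]) : a.fmod p = a'.fmod p := by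
  have h' : a % p = a' % p := h
  have hd : (p ∣ a) ↔ (p ∣ a') := by
    constructor <;> intro hdvd
    · have h0 : a % p = 0 := Int.emod_eq_zero_of_dvd hdvd
      exact Int.dvd_of_emod_eq_zero (by omega)
    · have h0 : a' % p = 0 := Int.emod_eq_zero_of_dvd hdvd
      exact Int.dvd_of_emod_eq_zero (by omega)
  have hif : (0 ≤ p ∨ p ∣ a) ↔ (0 ≤ p ∨ p ∣ a') := by rw [hd]
  rw [Int.fmod_eq_emod, Int.fmod_eq_emod, h', if_congr hif rfl rfl]

-- ---- plain (un-modded) Horner value of a window ----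
def pvPl (b : Int) (h : Int) (c : Char) : Int := h * b + (c.toNat : Int) - 96

def pvP (w : List Char) (b : Int) : Int := w.foldl (pvPl b) 0

def pvS (b : Int) : List Char → Nat → Int
  | [], _ => 0
  | c :: t, i => ((c.toNat : Int) - 96) * b ^ i + pvS b t (i + 1)

theorem pvPl_shift (b : Int) (t : List Char) : ∀ h : Int,
    t.foldl (pvPl b) h = h * b ^ t.length + pvP t b := by
  induction t with
  | nil => intro h; simp [pvP]
  | cons c t ih =>
    intro h
    show t.foldl (pvPl b) (pvPl b h c) = _
    rw [ih]
    have h2 : pvP (c :: t) b = t.foldl (pvPl b) (pvPl b 0 c) := rfl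
    rw [h2, ih]
    simp only [pvPl, List.length_cons]
    ring

theorem pvP_cons (b : Int) (c : Char) (t : List Char) :
    pvP (c :: t) b = ((c.toNat : Int) - 96) * b ^ t.length + pvP t b := by
  have h : pvP (c :: t) b = t.foldl (pvPl b) (pvPl b 0 c) := rfl
  rw [h, pvPl_shift]
  simp only [pvPl]
  ring

theorem pvP_append (b : Int) (t : List Char) (x : Char) :
    pvP (t ++ [x]) b = pvP t b * b + ((x.toNat : Int) - 96) := by
  simp [pvP, List.foldl_append, pvPl]
  ring

theorem pvPl_modeq (b p : Int) (t : List Char) : ∀ {x x' : Int}, x ≡ x' [ZMOD p] →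
    t.foldl (pvPl b) x ≡ t.foldl (pvPl b) x' [ZMOD p] := by
  induction t with
  | nil => intro x x' h; exact h
  | cons c t ih =>
    intro x x' h
    exact ih (((h.mul_right b).add_right _).sub_right _)

theorem pvWinHash_foldl (b p : Int) : ∀ (w : List Char) (h : Int), w ≠ [] →
    w.foldl (fun h c => PySem.Int.mod (h * b + (c.toNat : Int) - 96) p) h
      = (w.foldl (pvPl b) h).fmod p := by
  intro w
  induction w with
  | nil => intro h hne; exact absurd rfl hne
  | cons c t ih =>
    intro h _
    cases t with
    | nil => simp [PySem.Int.mod, pvPl]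
    | cons d u =>
      show (d :: u).foldl _ (PySem.Int.mod (h * b + (c.toNat : Int) - 96) p) = _
      rw [ih _ (by simp)]
      show _ = ((d :: u).foldl (pvPl b) (pvPl b h c)).fmod p
      apply pvFmodCongr
      exact pvPl_modeq b p (d :: u) (pvFmodModEq _ _)

theorem pvWinHash_eq_fmod (w : List Char) (b p : Int) (hw : w ≠ []) :
    pvWinHash w b p = (pvP w b).fmod p := pvWinHash_foldl b p w 0 hw

theorem pvS_shift (b : Int) (r : List Char) : ∀ i : Nat, pvS b r (i + 1) = b * pvS b r i := by
  induction r with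
  | nil => intro i; simp [pvS]
  | cons c t ih => intro i; simp only [pvS, ih]; ring

theorem pvP_eq_S (b : Int) (w : List Char) : pvP w b = pvS b w.reverse 0 := by
  induction w using List.reverseRecOn with
  | nil => simp [pvP, pvS]
  | append_singleton t x ih =>
    rw [pvP_append, List.reverse_append]
    simp only [List.reverse_singleton, List.singleton_append, pvS]
    rw [pvS_shift, ← ih]
    ring

theorem pvF_eq (c : Char) : pvF c = (c.toNat : Int) - 96 := by unfold pvF; ring

theorem pvPowMod_nonneg_eq (b p : Int) (j : Nat) : pvPowMod b (j : Int) p = (b ^ j).fmod p := by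
  unfold pvPowMod
  rw [if_neg (by omega), PySem.Int.powMod_eq]
  simp [pvModDef]

theorem pvHashAux (b p : Int) : ∀ (r : List Char) (j : Nat) (h : Int), r ≠ [] →
    (PySem.List.enumerate r (j : Int)).foldl
      (fun h ic => PySem.Int.mod (h + PySem.Int.mod (pvF ic.2 * pvPowMod b ic.1 p) p) p) h
    = (h + pvS b r j).fmod p := by
  intro r
  induction r with
  | nil => intro j h hne; exact absurd rfl hne
  | cons c t ih =>
    intro j h _
    rw [PySem.List.enumerate_cons]
    simp only [List.foldl_cons]
    have hj1 : (j : Int) + 1 = ((j + 1 : Nat) : Int) := by push_cast; ring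
    have hcong : PySem.Int.mod (h + PySem.Int.mod (pvF c * pvPowMod b (j : Int) p) p) p
        ≡ h + ((c.toNat : Int) - 96) * b ^ j [ZMOD p] := by
      rw [pvModDef, pvModDef, pvPowMod_nonneg_eq, pvF_eq]
      calc (h + (((c.toNat : Int) - 96) * (b ^ j).fmod p).fmod p).fmod p
          ≡ h + (((c.toNat : Int) - 96) * (b ^ j).fmod p).fmod p [ZMOD p] := pvFmodModEq _ _
        _ ≡ h + ((c.toNat : Int) - 96) * (b ^ j).fmod p [ZMOD p] :=
            Int.ModEq.add_left h (pvFmodModEq _ _)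
        _ ≡ h + ((c.toNat : Int) - 96) * b ^ j [ZMOD p] :=
            Int.ModEq.add_left h (Int.ModEq.mul_left _ (pvFmodModEq _ _))
    cases t with
    | nil =>
      simp only [PySem.List.enumerate_nil, List.foldl_nil]
      have hself : (PySem.Int.mod (h + PySem.Int.mod (pvF c * pvPowMod b (j : Int) p) p) p).fmod p
          = PySem.Int.mod (h + PySem.Int.mod (pvF c * pvPowMod b (j : Int) p) p) p := by
        rw [pvModDef, Int.fmod_fmod]
      rw [show pvS b [c] j = ((c.toNat : Int) - 96) * b ^ j + 0 from rfl]
      rw [← hself, pvFmodCongr hcong]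
      ring_nf
    | cons d u =>
      rw [hj1, ih (j + 1) _ (by simp)]
      apply pvFmodCongr
      show _ + pvS b (d :: u) (j + 1) ≡ h + pvS b (c :: d :: u) j [ZMOD p]
      have hS : pvS b (c :: d :: u) j = ((c.toNat : Int) - 96) * b ^ j + pvS b (d :: u) (j + 1) := rfl
      rw [hS, ← add_assoc]
      exact hcong.add_right _

theorem pvHash_eq_winHash (w : List Char) (b p : Int) : pvHash w b p = pvWinHash w b p := by
  by_cases hw : w = []
  · subst hw; rfl
  · have h0 : pvHash w b p = ((0 : Int) + pvS b w.reverse 0).fmod p := by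
      unfold pvHash
      have := pvHashAux b p w.reverse 0 0 (by simpa using hw)
      simpa using this
    rw [h0, zero_add, ← pvP_eq_S, pvWinHash_eq_fmod w b p hw]

-- ---- the rolling step of A produces exactly the next window's Horner hash ----
theorem pvRollStep (cs : List Char) (k' : Nat) (b p : Int) (acc : List Int) (j : Nat)
    (hk : 1 ≤ k') (hlt : j + k' < cs.length) :
    pvHashStep cs (k' : Int) b p (pvWinHash ((cs.drop j).take k') b p, acc) ((j + k' : Nat) : Int)
      = (pvWinHash ((cs.drop (j + 1)).take k') b p,
         acc ++ [pvWinHash ((cs.drop (j + 1)).take k') b p]) := by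
  have hj : j < cs.length := by omega
  obtain ⟨k0, rfl⟩ : ∃ k0, k' = k0 + 1 := ⟨k' - 1, by omega⟩
  have e1 : (cs.drop j).take (k0 + 1) = cs[j] :: (cs.drop (j + 1)).take k0 := by
    rw [List.drop_eq_getElem_cons hj, List.take_succ_cons]
  have e2 : (cs.drop (j + 1)).take (k0 + 1) = (cs.drop (j + 1)).take k0 ++ [cs[j + (k0 + 1)]] := by
    rw [List.take_succ, List.getElem?_drop]
    congr 1
    rw [show j + 1 + k0 = j + (k0 + 1) from by omega, List.getElem?_eq_getElem (by omega)]
    rfl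
  have hrl : ((cs.drop (j + 1)).take k0).length = k0 := by
    rw [List.length_take, List.length_drop]; omega
  have hne1 : (cs.drop j).take (k0 + 1) ≠ [] := by rw [e1]; simp
  have hne2 : (cs.drop (j + 1)).take (k0 + 1) ≠ [] := by rw [e2]; simp
  have hP : pvP ((cs.drop (j + 1)).take (k0 + 1)) b
      = (pvP ((cs.drop j).take (k0 + 1)) b - ((cs[j].toNat : Int) - 96) * b ^ k0) * b
        + ((cs[j + (k0 + 1)].toNat : Int) - 96) := by
    rw [e1, e2, pvP_cons, pvP_append, hrl]; ring
  have hg1 : PySem.List.pyGetD cs (((j + (k0 + 1) : Nat) : Int) - ((k0 + 1 : Nat) : Int)) 'a' = cs[j] := by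
    rw [show (((j + (k0 + 1) : Nat) : Int) - ((k0 + 1 : Nat) : Int)) = ((j : Nat) : Int) from by push_cast; ring]
    rw [PySem.List.pyGetD_natCast, List.getD_eq_getElem _ _ hj]
  have hg2 : PySem.List.pyGetD cs ((j + (k0 + 1) : Nat) : Int) 'a' = cs[j + (k0 + 1)] := by
    rw [PySem.List.pyGetD_natCast, List.getD_eq_getElem _ _ hlt]
  have hpow : pvPowMod b (((k0 + 1 : Nat) : Int) - 1) p = (b ^ k0).fmod p := by
    rw [show (((k0 + 1 : Nat) : Int) - 1) = ((k0 : Nat) : Int) from by push_cast; ring, pvPowMod_nonneg_eq]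
  have hfin : ((((pvWinHash ((cs.drop j).take (k0 + 1)) b p
          - (pvF cs[j] * (b ^ k0).fmod p).fmod p).fmod p) * b).fmod p + pvF cs[j + (k0 + 1)]).fmod p
      = pvWinHash ((cs.drop (j + 1)).take (k0 + 1)) b p := by
    rw [pvWinHash_eq_fmod _ b p hne2, pvWinHash_eq_fmod _ b p hne1]
    apply pvFmodCongr
    have c1 : (pvP ((cs.drop j).take (k0 + 1)) b).fmod p - (pvF cs[j] * (b ^ k0).fmod p).fmod p
        ≡ pvP ((cs.drop j).take (k0 + 1)) b - pvF cs[j] * b ^ k0 [ZMOD p] :=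
      Int.ModEq.sub (pvFmodModEq _ _)
        ((pvFmodModEq _ _).trans (Int.ModEq.mul_left _ (pvFmodModEq _ _)))
    have c2 := ((pvFmodModEq _ _).trans c1).mul_right b
    have c3 := ((pvFmodModEq _ _).trans c2).add_right (pvF cs[j + (k0 + 1)])
    refine c3.trans ?_
    rw [hP, pvF_eq, pvF_eq]
  show (PySem.Int.mod (PySem.Int.mod (PySem.Int.mod (pvWinHash ((cs.drop j).take (k0+1)) b p
      - PySem.Int.mod (pvF (PySem.List.pyGetD cs (((j + (k0+1) : Nat) : Int) - ((k0+1 : Nat) : Int)) 'a')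
        * pvPowMod b (((k0+1 : Nat) : Int) - 1) p) p) p * b) p
      + pvF (PySem.List.pyGetD cs ((j + (k0+1) : Nat) : Int) 'a')) p, _) = _
  rw [hg1, hg2, hpow]
  simp only [pvModDef]
  rw [hfin]

theorem pvRollRange (cs : List Char) (k' : Nat) (b p : Int) (hk : 1 ≤ k') :
    ∀ d : Nat, k' + d ≤ cs.length →
    (PySem.List.pyRange (k' : Int) ((k' + d : Nat) : Int) 1).foldl (pvHashStep cs (k' : Int) b p)
      (pvWinHash (cs.take k') b p, [pvWinHash (cs.take k') b p])
    = (pvWinHash ((cs.drop d).take k') b p,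
       (List.range (d + 1)).map (fun j => pvWinHash ((cs.drop j).take k') b p)) := by
  intro d
  induction d with
  | zero =>
    intro _
    rw [show ((k' + 0 : Nat) : Int) = (k' : Int) from by simp, PySem.List.pyRange_one_eq_nil le_rfl]
    simp [List.range_one]
  | succ d ih =>
    intro hle
    have h1 : ((k' + (d + 1) : Nat) : Int) = ((k' + d : Nat) : Int) + 1 := by push_cast; ring
    rw [h1, PySem.List.pyRange_one_succ_right (by push_cast; omega), List.foldl_append, ih (by omega)]
    simp only [List.foldl_cons, List.foldl_nil]
    rw [show ((k' + d : Nat) : Int) = ((d + k' : Nat) : Int) from by push_cast; ring]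
    rw [pvRollStep cs k' b p _ d hk (by omega)]
    congr 1
    rw [List.range_succ (n := d + 1), List.range_succ (n := d)]
    simp

-- ---- k = 0: every rolling step cancels to 0 (the modular inverse of b times b is 1 mod p) ----
theorem pvZeroStep (cs : List Char) (b p : Int) (hg : Int.gcd b p = 1) (acc : List Int)
    (i : Int) : pvHashStep cs 0 b p (0, acc) i = (0, acc ++ [0]) := by
  have hinv : b * Int.gcdA b p ≡ 1 [ZMOD p] := by
    have hb := Int.gcd_eq_gcd_ab b p
    rw [hg] at hb
    exact (Int.modEq_iff_dvd.mpr ⟨-(Int.gcdB b p), by push_cast at hb ⊢; linarith⟩).symm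
  have hpm : pvPowMod b (0 - 1) p = (Int.gcdA b p).fmod p := by
    unfold pvPowMod
    rw [if_pos (by omega)]
    norm_num [pvModDef, Int.fmod_fmod]
  have hfin : ∀ c : Char,
      ((((0 : Int) - (pvF c * (Int.gcdA b p).fmod p).fmod p).fmod p * b).fmod p + pvF c).fmod p = 0 := by
    intro c
    have c1 : (pvF c * (Int.gcdA b p).fmod p).fmod p ≡ pvF c * Int.gcdA b p [ZMOD p] :=
      (pvFmodModEq _ _).trans (Int.ModEq.mul_left _ (pvFmodModEq _ _))
    have c2 : (0 : Int) - (pvF c * (Int.gcdA b p).fmod p).fmod p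
        ≡ 0 - pvF c * Int.gcdA b p [ZMOD p] := Int.ModEq.sub (Int.ModEq.refl 0) c1
    have c3 := ((pvFmodModEq _ _).trans c2).mul_right b
    have c4 := ((pvFmodModEq _ _).trans c3).add_right (pvF c)
    have c5 : ((0 : Int) - pvF c * Int.gcdA b p) * b + pvF c ≡ 0 [ZMOD p] := by
      have h6 : ((0 : Int) - pvF c * Int.gcdA b p) * b + pvF c
          = pvF c - pvF c * (b * Int.gcdA b p) := by ring
      rw [h6]
      calc pvF c - pvF c * (b * Int.gcdA b p)
          ≡ pvF c - pvF c * 1 [ZMOD p] := Int.ModEq.sub (Int.ModEq.refl _) (Int.ModEq.mul_left _ hinv)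
        _ = 0 := by ring
    simpa [Int.zero_fmod] using pvFmodCongr (c4.trans c5)
  show (PySem.Int.mod (PySem.Int.mod (PySem.Int.mod ((0 : Int)
      - PySem.Int.mod (pvF (PySem.List.pyGetD cs (i - 0) 'a') * pvPowMod b (0 - 1) p) p) p * b) p
      + pvF (PySem.List.pyGetD cs i 'a')) p, acc ++ [_]) = (0, acc ++ [0])
  rw [hpm, sub_zero]
  simp only [pvModDef]
  rw [hfin (PySem.List.pyGetD cs i 'a')]

theorem pvZeroRange (cs : List Char) (b p : Int) (hg : Int.gcd b p = 1) :
    ∀ d : Nat, (PySem.List.pyRange 0 (d : Int) 1).foldl (pvHashStep cs 0 b p) (0, [0])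
      = (0, List.replicate (d + 1) 0) := by
  intro d
  induction d with
  | zero => simp [PySem.List.pyRange_one_eq_nil le_rfl, List.replicate]
  | succ d ih =>
    rw [show ((d + 1 : Nat) : Int) = ((d : Nat) : Int) + 1 from by push_cast; ring]
    rw [PySem.List.pyRange_one_succ_right (by positivity), List.foldl_append, ih]
    simp only [List.foldl_cons, List.foldl_nil]
    rw [pvZeroStep cs b p hg _ _, List.replicate_succ' (n := d + 1)]

-- ---- B's prefix-difference formula equals the per-window Horner hash ----
theorem pvWinHash_fmod (w : List Char) (b p : Int) : pvWinHash w b p = (pvP w b).fmod p := by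
  by_cases hw : w = []
  · subst hw; simp [pvWinHash, pvP, Int.zero_fmod]
  · exact pvWinHash_eq_fmod w b p hw

theorem pvWinHash_append (u : List Char) (c : Char) (b p : Int) :
    pvWinHash (u ++ [c]) b p
      = PySem.Int.mod (pvWinHash u b p * b + (c.toNat : Int) - 96) p := by
  simp [pvWinHash, List.foldl_append]

theorem pvP_split (u v : List Char) (b : Int) :
    pvP (u ++ v) b = pvP u b * b ^ v.length + pvP v b := by
  unfold pvP
  rw [List.foldl_append]
  exact pvPl_shift b v _

theorem pvPref_pair (cs : List Char) (b p : Int) :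
    cs.foldl (fun st c =>
        let h := PySem.Int.mod (st.1 * b + (c.toNat : Int) - 96) p
        (h, st.2 ++ [h])) ((0 : Int), [(0 : Int)])
      = (pvWinHash cs b p,
         (List.range (cs.length + 1)).map (fun j => pvWinHash (cs.take j) b p)) := by
  induction cs using List.reverseRecOn with
  | nil => simp [pvWinHash, List.range_one]
  | append_singleton u c ih =>
    rw [List.foldl_append, ih]
    simp only [List.foldl_cons, List.foldl_nil]
    refine Prod.ext ?_ ?_
    · show PySem.Int.mod (pvWinHash u b p * b + (c.toNat : Int) - 96) p = _
      rw [pvWinHash_append]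
    · show (List.range (u.length + 1)).map (fun j => pvWinHash (u.take j) b p)
          ++ [PySem.Int.mod (pvWinHash u b p * b + (c.toNat : Int) - 96) p]
        = (List.range ((u ++ [c]).length + 1)).map (fun j => pvWinHash ((u ++ [c]).take j) b p)
      rw [show (u ++ [c]).length + 1 = (u.length + 1) + 1 from by simp]
      rw [List.range_succ (n := u.length + 1), List.map_append, List.map_singleton]
      congr 1
      · apply List.map_congr_left
        intro j hj
        rw [List.mem_range] at hj
        rw [List.take_append_of_le_length (by omega)]
      · rw [List.take_of_length_le (by simp), pvWinHash_append]

theorem pvPrefAt (cs : List Char) (b p : Int) (t : Nat) (ht : t < cs.length + 1) :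
    PySem.List.pyGetD (pvPref cs b p) ((t : Nat) : Int) 0 = pvWinHash (cs.take t) b p := by
  unfold pvPref
  rw [pvPref_pair]
  rw [PySem.List.pyGetD_natCast, List.getD_eq_getElem _ _ (by simpa using ht)]
  rw [List.getElem_map, List.getElem_range]

theorem pvWindowHashesEq (cs : List Char) (k b p : Int) (hk : 0 ≤ k) :
    pvWindowHashes cs k b p
      = (PySem.List.pyRange 0 (1 + max 0 ((cs.length : Int) - k)) 1).map
          (fun i => pvWinHash (PySem.List.slice cs (some i) (some (i + k))) b p) := by
  unfold pvWindowHashes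
  by_cases hc : (cs.length : Int) = 0 ∨ k > (cs.length : Int)
  · rw [if_pos hc]
    have hle : (cs.length : Int) ≤ k := by rcases hc with h | h <;> omega
    rw [show 1 + max 0 ((cs.length : Int) - k) = 0 + 1 from by rw [max_eq_left (by omega)]; ring]
    rw [PySem.List.pyRange_one_singleton, List.map_singleton]
    rw [show ((cs.length : Nat) : Int) = (((cs.length : Nat) : Nat) : Int) from rfl]
    rw [pvPrefAt cs b p cs.length (by omega), List.take_length]
    rw [PySem.List.slice_zero_start, PySem.List.slice_to cs (by omega), List.take_of_length_le (by omega)]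
  · rw [if_neg hc]
    push_neg at hc
    obtain ⟨hn0, hkn⟩ := hc
    have hn1 : 1 ≤ cs.length := by omega
    obtain ⟨k', rfl⟩ : ∃ k' : Nat, k = (k' : Int) := ⟨k.toNat, by omega⟩
    have hkn' : k' ≤ cs.length := by omega
    simp only [Int.toNat_natCast]
    rw [show ((cs.length : Int) - (k' : Int) + 1) = ((cs.length - k' + 1 : Nat) : Int) from by
      push_cast; omega]
    rw [show 1 + max 0 ((cs.length : Int) - (k' : Int)) = ((cs.length - k' + 1 : Nat) : Int) from by
      rw [max_eq_right (by omega)]; push_cast; omega]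
    rw [PySem.List.pyRange_zero_nat, List.map_map, List.map_map]
    apply List.map_congr_left
    intro j hj
    rw [List.mem_range] at hj
    show PySem.Int.mod (PySem.List.pyGetD (pvPref cs b p) ((j : Int) + (k' : Int)) 0
        - PySem.List.pyGetD (pvPref cs b p) ((j : Int)) 0 * PySem.Int.powMod b k' p) p
      = pvWinHash (PySem.List.slice cs (some (j : Int)) (some ((j : Int) + (k' : Int)))) b p
    rw [PySem.List.slice_natCast_add]
    rw [show ((j : Int) + (k' : Int)) = ((j + k' : Nat) : Int) from by push_cast; ring]
    rw [pvPrefAt cs b p (j + k') (by omega), pvPrefAt cs b p j (by omega)]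
    have hwl : ((cs.drop j).take k').length = k' := by
      rw [List.length_take, List.length_drop]; omega
    have hsplit : cs.take (j + k') = cs.take j ++ (cs.drop j).take k' := List.take_add
    rw [pvWinHash_fmod, pvWinHash_fmod, pvWinHash_fmod]
    rw [show PySem.Int.powMod b k' p = (b ^ k').fmod p from by
      rw [PySem.Int.powMod_eq, pvModDef]]
    rw [pvModDef]
    apply pvFmodCongr
    have c1 : (pvP (cs.take (j + k')) b).fmod p
          - (pvP (cs.take j) b).fmod p * (b ^ k').fmod p
        ≡ pvP (cs.take (j + k')) b - pvP (cs.take j) b * b ^ k' [ZMOD p] :=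
      Int.ModEq.sub (pvFmodModEq _ _) (Int.ModEq.mul (pvFmodModEq _ _) (pvFmodModEq _ _))
    refine c1.trans ?_
    rw [hsplit, pvP_split, hwl]
    rw [show pvP (cs.take j) b * b ^ k' + pvP ((cs.drop j).take k') b
        - pvP (cs.take j) b * b ^ k' = pvP ((cs.drop j).take k') b from by ring]

-- ---- A's hash stream equals B's per-window Horner stream ----
theorem pvHashesEq (cs : List Char) (k b p : Int)
    (h1 : 1 ≤ k ∨ (k = 0 ∧ (cs = [] ∨ Int.gcd b p = 1))) :
    pvHashes cs k b p
      = (PySem.List.pyRange 0 (1 + max 0 ((cs.length : Int) - k)) 1).map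
          (fun i => pvWinHash (PySem.List.slice cs (some i) (some (i + k))) b p) := by
  have hk0 : 0 ≤ k := by rcases h1 with h | h <;> omega
  by_cases hle : (cs.length : Int) ≤ k
  · -- single window: hashes() yields only _hash(s[:k]) = _hash(s)
    have hmax : 1 + max 0 ((cs.length : Int) - k) = 0 + 1 := by
      rw [max_eq_left (by omega)]; ring
    unfold pvHashes
    rw [PySem.List.pyRange_one_eq_nil hle]
    simp only [List.foldl_nil]
    rw [hmax, PySem.List.pyRange_one_singleton, List.map_singleton]
    rw [PySem.List.slice_to cs hk0, List.take_of_length_le (by omega), pvHash_eq_winHash]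
    rw [PySem.List.slice_zero_start, PySem.List.slice_to cs (by omega : (0:Int) ≤ 0 + k)]
    rw [List.take_of_length_le (by omega)]
  · push_neg at hle
    rcases h1 with hk1 | ⟨hkz, hrest⟩
    · -- k ≥ 1, k < len: the rolling loop, window by window
      have hkk : k = (k.toNat : Int) := by omega
      have hk'1 : 1 ≤ k.toNat := by omega
      unfold pvHashes
      rw [PySem.List.slice_to cs hk0, pvHash_eq_winHash]
      rw [hkk]
      simp only [Int.toNat_natCast]
      rw [show ((cs.length : Nat) : Int) = ((k.toNat + (cs.length - k.toNat) : Nat) : Int) from by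
        push_cast; omega]
      rw [pvRollRange cs k.toNat b p hk'1 (cs.length - k.toNat) (by omega)]
      have hmax : 1 + max 0 (((k.toNat + (cs.length - k.toNat) : Nat) : Int) - (k.toNat : Int))
          = (((cs.length - k.toNat) + 1 : Nat) : Int) := by
        rw [max_eq_right (by push_cast; omega)]; push_cast; omega
      rw [hmax, PySem.List.pyRange_zero_nat, List.map_map]
      apply List.map_congr_left
      intro j _
      show pvWinHash ((cs.drop j).take k.toNat) b p = _
      rw [Function.comp_apply, PySem.List.slice_natCast_add]
    · -- k = 0, s nonempty: every window is empty and every rolling step cancels to 0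
      subst hkz
      have hcs : cs ≠ [] := by
        intro h; rw [h] at hle; simp at hle
      have hg : Int.gcd b p = 1 := by
        rcases hrest with h | h
        · exact absurd h hcs
        · exact h
      unfold pvHashes
      rw [PySem.List.slice_to cs le_rfl]
      simp only [Int.toNat_zero, List.take_zero]
      rw [show pvHash [] b p = 0 from rfl]
      rw [pvZeroRange cs b p hg cs.length]
      have hmax : 1 + max 0 ((cs.length : Int) - 0) = ((cs.length + 1 : Nat) : Int) := by
        rw [max_eq_right (by omega)]; push_cast; ring
      rw [hmax, PySem.List.pyRange_zero_nat, List.map_map]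
      have hpt : ∀ j ∈ List.range (cs.length + 1),
          ((fun i => pvWinHash (PySem.List.slice cs (some i) (some (i + 0))) b p)
            ∘ (fun kk : Nat => (kk : Int))) j = (0 : Int) := by
        intro j _
        show pvWinHash (PySem.List.slice cs (some ((j : Nat) : Int)) (some (((j : Nat) : Int) + 0))) b p = 0
        rw [show ((j : Nat) : Int) + 0 = ((j : Nat) : Int) + ((0 : Nat) : Int) from by simp]
        rw [PySem.List.slice_natCast_add]
        rfl
      rw [List.map_congr_left hpt, List.map_const', List.length_range]

-- ---- last index of a hash value, dict characterisation, sort order (A's tail pipeline) ----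
def pvLast (l : List Int) (h : Int) : Int :=
  (PySem.List.enumerate l 0).foldl (fun acc q => if q.2 = h then q.1 else acc) (-1)

theorem pvFirstGe_eq_find? (m : Int) (l : List (Int × Int)) :
    pvFirstGe m l = (l.find? (fun x => decide (x.1 ≥ m))).map (·.2) := by
  induction l with
  | nil => rfl
  | cons v rest ih => by_cases h : v.1 ≥ m <;> simp [pvFirstGe, List.find?, h, ih]

theorem pvLast_append (l : List Int) (x h : Int) :
    pvLast (l ++ [x]) h = if x = h then (l.length : Int) else pvLast l h := by
  unfold pvLast
  rw [PySem.List.enumerate_append, List.foldl_append]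
  simp [PySem.List.enumerate]

theorem pvLast_spec (l : List Int) (h : Int) (hmem : h ∈ l) :
    ∃ t : Nat, t < l.length ∧ pvLast l h = (t : Int) ∧ l.getD t 0 = h ∧
      ∀ j, t < j → j < l.length → l.getD j 0 ≠ h := by
  induction l using List.reverseRecOn with
  | nil => simp at hmem
  | append_singleton l x ih =>
    rw [List.mem_append] at hmem
    by_cases hx : x = h
    · refine ⟨l.length, by simp, ?_, ?_, ?_⟩
      · rw [pvLast_append]; simp [hx]
      · simp [hx]
      · intro j hj hj'; simp at hj'; omega
    · have hm : h ∈ l := by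
        rcases hmem with h1 | h1
        · exact h1
        · exact absurd (List.mem_singleton.mp h1).symm hx
      obtain ⟨t, ht, he, hg, hlast⟩ := ih hm
      refine ⟨t, by simp; omega, ?_, ?_, ?_⟩
      · rw [pvLast_append]; simp [hx, he]
      · rw [List.getD_append _ _ _ _ ht]; exact hg
      · intro j hj hj'
        simp at hj'
        by_cases hjl : j < l.length
        · rw [List.getD_append _ _ _ _ hjl]; exact hlast j hj hjl
        · have : j = l.length := by omega
          subst this
          simp [List.getD_append_right, hx]

theorem pvDictA_get? (l : List Int) (h : Int) :
    ((PySem.List.enumerate l 0).foldl pvStepA PySem.Dict.empty).get? h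
      = if l.count h = 0 then none else some ((l.count h : Int), pvLast l h) := by
  induction l using List.reverseRecOn with
  | nil => simp [PySem.List.enumerate, PySem.Dict.get?_empty]
  | append_singleton l x ih =>
    rw [PySem.List.enumerate_append, List.foldl_append]
    simp only [PySem.List.enumerate, List.foldl_cons, List.foldl_nil]
    by_cases hx : x = h
    · subst hx
      rw [List.count_append]
      simp only [pvStepA, ih]
      by_cases hc : l.count x = 0
      · simp [hc, pvLast_append]
      · simp [hc, pvLast_append]
    · rw [List.count_append]
      have hcx : [x].count h = 0 := by simp [hx]
      rw [hcx]
      simp only [pvStepA]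
      cases hg : ((PySem.List.enumerate l 0).foldl pvStepA PySem.Dict.empty).get? x
      · rw [PySem.Dict.get?_insert]
        simp [hx, ih, pvLast_append, Ne.symm hx]
      · rw [PySem.Dict.get?_insert]
        simp [hx, ih, pvLast_append, Ne.symm hx]

theorem pvStepA_eq (d : PySem.Dict Int (Int × Int)) (ih : Int × Int) :
    pvStepA d ih = d.insert ih.2 (match d.get? ih.2 with | none => ((1 : Int), ih.1) | some v => (v.1 + 1, ih.1)) := by
  cases hg : d.get? ih.2 <;> simp [pvStepA, hg]

theorem pvDictA_nodup (l : List Int) :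
    ((PySem.List.enumerate l 0).foldl pvStepA PySem.Dict.empty).keys.Nodup := by
  have : (PySem.List.enumerate l 0).foldl pvStepA PySem.Dict.empty
      = (PySem.List.enumerate l 0).foldl
          (fun d ih => d.insert ih.2 (match d.get? ih.2 with | none => ((1 : Int), ih.1) | some v => (v.1 + 1, ih.1)))
          PySem.Dict.empty := by
    congr 1; funext d ih; exact pvStepA_eq d ih
  rw [this]
  exact PySem.Dict.nodup_keys_foldl_insert_key _ (fun ih : Int × Int => ih.2)
    (fun d ih => (match d.get? ih.2 with | none => ((1 : Int), ih.1) | some v => (v.1 + 1, ih.1)))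
    _ PySem.Dict.nodup_keys_empty

theorem pvValues_mem (l : List Int) (v : Int × Int)
    (hv : v ∈ ((PySem.List.enumerate l 0).foldl pvStepA PySem.Dict.empty).values) :
    ∃ h ∈ l, v = ((l.count h : Int), pvLast l h) := by
  simp only [PySem.Dict.values, List.mem_map] at hv
  obtain ⟨⟨key, vv⟩, hmem, hev⟩ := hv
  have hg := (PySem.Dict.get?_eq_some_iff_mem_items _ key vv (pvDictA_nodup l)).mpr hmem
  rw [pvDictA_get? l key] at hg
  by_cases hc : l.count key = 0
  · simp [hc] at hg
  · simp [hc] at hg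
    exact ⟨key, List.count_pos_iff.mp (Nat.pos_of_ne_zero hc), by simp [← hev, ← hg]⟩

theorem pvValues_mem' (l : List Int) (h : Int) (hmem : h ∈ l) :
    ((l.count h : Int), pvLast l h) ∈ ((PySem.List.enumerate l 0).foldl pvStepA PySem.Dict.empty).values := by
  have hc : l.count h ≠ 0 := by
    simpa [Nat.pos_iff_ne_zero] using List.count_pos_iff.mpr hmem
  have hg : ((PySem.List.enumerate l 0).foldl pvStepA PySem.Dict.empty).get? h
      = some ((l.count h : Int), pvLast l h) := by rw [pvDictA_get?]; simp [hc]
  have := PySem.Dict.mem_items_of_get?_eq_some _ hg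
  simp only [PySem.Dict.values, List.mem_map]
  exact ⟨_, this, rfl⟩

theorem pvInsertBy_pairwise {α : Type} (before : α → α → Bool)
    (hasym : ∀ a b, before a b = true → before b a = false)
    (htrans : ∀ x y w, before x y = true → before w x = true → before w y = true)
    (x : α) (l : List α) (hl : l.Pairwise (fun a b => before b a = false)) :
    (PySem.List.insertBy before x l).Pairwise (fun a b => before b a = false) := by
  induction l with
  | nil => simp [PySem.List.insertBy]
  | cons y ys ih =>
    rw [List.pairwise_cons] at hl
    obtain ⟨hy, hys⟩ := hl
    by_cases hb : before x y = true
    · simp only [PySem.List.insertBy, hb, if_true]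
      refine List.Pairwise.cons ?_ (List.Pairwise.cons hy hys)
      intro z hz
      rcases List.mem_cons.mp hz with rfl | hz'
      · exact hasym _ _ hb
      · by_contra hc
        have hzx : before z x = true := by
          cases hzx : before z x
          · exact absurd hzx hc
          · rfl
        exact absurd (htrans x y z hb hzx) (by simp [hy z hz'])
    · have hb' : before x y = false := by cases hxy : before x y; rfl; exact absurd hxy hb
      simp only [PySem.List.insertBy, hb', Bool.false_eq_true, if_false]
      refine List.Pairwise.cons ?_ (ih hys)
      intro z hz
      rcases (PySem.List.mem_insertBy before x z ys).mp hz with rfl | hz'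
      · exact hb'
      · exact hy z hz'

theorem pvFoldlInsertBy_pairwise {α : Type} (before : α → α → Bool)
    (hasym : ∀ a b, before a b = true → before b a = false)
    (htrans : ∀ x y w, before x y = true → before w x = true → before w y = true)
    (xs : List α) (acc : List α) (hacc : acc.Pairwise (fun a b => before b a = false)) :
    (xs.foldl (fun acc x => PySem.List.insertBy before x acc) acc).Pairwise (fun a b => before b a = false) := by
  induction xs generalizing acc with
  | nil => exact hacc
  | cons x xs ih => exact ih _ (pvInsertBy_pairwise before hasym htrans x acc hacc)

theorem pvSorted2_pairwise (xs : List (Int × Int)) :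
    (PySem.List.sorted2 xs (fun x => x.2) (fun x => x.1) true).Pairwise
      (fun a b => b.2 ≤ a.2) := by
  have h : (PySem.List.sorted2 xs (fun x => x.2) (fun x => x.1) true)
      = xs.foldl (fun acc x => PySem.List.insertBy
          (fun a b : Int × Int => decide (b.2 < a.2) || (!decide (a.2 < b.2) && decide (b.1 < a.1))) x acc) [] := by
    simp [PySem.List.sorted2]
  rw [h]
  have hp := pvFoldlInsertBy_pairwise
    (fun a b : Int × Int => decide (b.2 < a.2) || (!decide (a.2 < b.2) && decide (b.1 < a.1)))
    (by intro a b hab; simp at hab ⊢; rcases hab with h1 | h1 <;> omega)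
    (by intro a b c hab hca; simp at hab hca ⊢; rcases hab with h1 | h1 <;> rcases hca with h2 | h2 <;> omega)
    xs [] (by simp)
  refine hp.imp ?_
  intro a b hab
  simp at hab
  omega

theorem pvFind?_range {q : Nat → Bool} (n j : Nat) (hj : j < n) (hq : q j = true)
    (hmin : ∀ i, i < j → q i = false) : (List.range n).find? q = some j := by
  induction n generalizing q j with
  | zero => omega
  | succ n ih =>
    rw [List.range_succ_eq_map]
    cases j with
    | zero => simp [List.find?_cons, hq]
    | succ j' =>
      have h0 : q 0 = false := hmin 0 (by omega)
      rw [List.find?_cons]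
      simp only [h0, Bool.false_eq_true, if_false]
      rw [List.find?_map]
      have := ih (q := fun i => q (i + 1)) j' (by omega) (by simpa using hq)
        (fun i hi => hmin (i + 1) (by omega))
      simp only [Function.comp] at this ⊢
      rw [show (fun i => q (i+1)) = (q ∘ Nat.succ) from rfl] at this
      rw [this]
      rfl

theorem pvMain (hs : List Int) (m : Int) :
    pvFirstGe m (PySem.List.sorted2
        ((PySem.List.enumerate hs 0).foldl pvStepA PySem.Dict.empty).values
        (fun x => x.2) (fun x => x.1) true)
      = (PySem.List.pyRange ((hs.length : Int) - 1) (-1) (-1)).find?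
          (fun i => decide ((hs.foldl (fun d h => d.insert h (d.getD h 0 + 1)) PySem.Dict.empty).getD
            (PySem.List.pyGetD hs i 0) 0 ≥ m)) := by
  have hcnt : ∀ v : Int, (hs.foldl (fun d h => d.insert h (d.getD h 0 + 1)) PySem.Dict.empty).getD v 0
      = (hs.count v : Int) := by
    intro v
    rw [PySem.Dict.getD_foldl_insert_add_one, PySem.Dict.getD_empty]
    ring
  set l' := PySem.List.sorted2
      ((PySem.List.enumerate hs 0).foldl pvStepA PySem.Dict.empty).values
      (fun x => x.2) (fun x => x.1) true with hl'def
  rw [pvFirstGe_eq_find?]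
  by_cases hex : ∃ i, i < hs.length ∧ m ≤ (hs.count (hs.getD i 0) : Int)
  · obtain ⟨i0, hi0n, hi0⟩ := hex
    have hn1 : 1 ≤ hs.length := by omega
    set P : Nat → Prop := fun i => m ≤ (hs.count (hs.getD i 0) : Int) with hPdef
    set t := Nat.findGreatest P (hs.length - 1) with htdef
    have ht : P t := Nat.findGreatest_spec (m := i0) (by omega) hi0
    have htle : t ≤ hs.length - 1 := Nat.findGreatest_le _
    have hgt : ∀ j, t < j → j ≤ hs.length - 1 → ¬ P j := fun j h1 h2 =>
      Nat.findGreatest_is_greatest h1 h2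
    have hRHS : (PySem.List.pyRange ((hs.length : Int) - 1) (-1) (-1)).find?
          (fun i => decide ((hs.foldl (fun d h => d.insert h (d.getD h 0 + 1)) PySem.Dict.empty).getD
            (PySem.List.pyGetD hs i 0) 0 ≥ m)) = some (t : Int) := by
      rw [PySem.List.pyRange_neg_one]
      have hlen : (((hs.length : Int) - 1) - (-1)).toNat = hs.length := by omega
      rw [hlen, List.find?_map]
      have hfr := pvFind?_range (q := fun j =>
          decide ((hs.foldl (fun d h => d.insert h (d.getD h 0 + 1)) PySem.Dict.empty).getD
            (PySem.List.pyGetD hs ((hs.length : Int) - 1 - j) 0) 0 ≥ m))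
        hs.length (hs.length - 1 - t) (by omega) ?_ ?_
      · rw [show ((fun i => decide ((hs.foldl (fun d h => d.insert h (d.getD h 0 + 1)) PySem.Dict.empty).getD
            (PySem.List.pyGetD hs i 0) 0 ≥ m)) ∘ (fun k : Nat => (hs.length : Int) - 1 - k))
            = (fun j : Nat => decide ((hs.foldl (fun d h => d.insert h (d.getD h 0 + 1)) PySem.Dict.empty).getD
            (PySem.List.pyGetD hs ((hs.length : Int) - 1 - j) 0) 0 ≥ m)) from rfl]
        rw [hfr]
        simp only [Option.map_some]
        congr 1
        omega
      · have harg : ((hs.length : Int) - 1 - ((hs.length : Nat) - 1 - t : Nat)) = (t : Int) := by omega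
        beta_reduce
        rw [harg]
        rw [PySem.List.pyGetD_of_nonneg _ _ (by omega)]
        simp only [Int.toNat_natCast, hcnt]
        simpa using ht
      · intro i hi
        have harg : ((hs.length : Int) - 1 - (i : Nat)) = ((hs.length - 1 - i : Nat) : Int) := by omega
        beta_reduce
        rw [harg, PySem.List.pyGetD_of_nonneg _ _ (by omega)]
        simp only [Int.toNat_natCast, hcnt]
        have := hgt (hs.length - 1 - i) (by omega) (by omega)
        simpa [hPdef] using this
    rw [hRHS]
    have hmemt : hs.getD t 0 ∈ hs := by
      rw [List.getD_eq_getElem _ _ (by omega)]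
      exact List.getElem_mem _
    have hw := pvValues_mem' hs (hs.getD t 0) hmemt
    have hlast : pvLast hs (hs.getD t 0) = (t : Int) := by
      obtain ⟨t', ht'n, he', hg', hmax'⟩ := pvLast_spec hs (hs.getD t 0) hmemt
      have h1 : ¬ t' < t := fun hc => hmax' t hc (by omega) rfl
      have h2 : ¬ t < t' := by
        intro hc
        refine hgt t' hc (by omega) ?_
        show m ≤ (hs.count (hs.getD t' 0) : Int)
        rw [hg']
        exact ht
      have : t' = t := by omega
      rw [he', this]
    rw [hlast] at hw
    have hwin : ((hs.count (hs.getD t 0) : Int), (t : Int)) ∈ l' := by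
      rw [hl'def]
      have := (PySem.List.sorted2_perm
        ((PySem.List.enumerate hs 0).foldl pvStepA PySem.Dict.empty).values
        (fun x => x.2) (fun x => x.1) true).mem_iff (a := ((hs.count (hs.getD t 0) : Int), (t : Int)))
      rw [this]
      exact hw
    cases hfind : l'.find? (fun x => decide (x.1 ≥ m)) with
    | none =>
      exact absurd (List.find?_eq_none.mp hfind _ hwin) (by simpa using ht)
    | some x₀ =>
      obtain ⟨hx₀p, as, bs, hsplit, has⟩ := List.find?_eq_some_iff_append.mp hfind
      have hx₀mem : x₀ ∈ l' := by rw [hsplit]; simp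
      have hx₀val : ∃ h ∈ hs, x₀ = ((hs.count h : Int), pvLast hs h) := by
        apply pvValues_mem
        have := (PySem.List.sorted2_perm
          ((PySem.List.enumerate hs 0).foldl pvStepA PySem.Dict.empty).values
          (fun x => x.2) (fun x => x.1) true).mem_iff (a := x₀)
        rw [hl'def] at hx₀mem
        rwa [this] at hx₀mem
      obtain ⟨h', hh'mem, hx₀eq⟩ := hx₀val
      obtain ⟨t'', ht''n, he'', hg'', _⟩ := pvLast_spec hs h' hh'mem
      have hPt'' : P t'' := by
        have hmc : m ≤ (hs.count h' : Int) := by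
          rw [hx₀eq] at hx₀p; simpa using hx₀p
        show m ≤ (hs.count (hs.getD t'' 0) : Int)
        rw [hg'']
        exact hmc
      have ht''le : t'' ≤ t := by
        by_contra hc
        exact hgt t'' (by omega) (by omega) hPt''
      have hx₀2le : x₀.2 ≤ (t : Int) := by
        rw [hx₀eq]
        show pvLast hs h' ≤ (t : Int)
        rw [he'']
        omega
      have hx₀2ge : (t : Int) ≤ x₀.2 := by
        have hwnotas : ((hs.count (hs.getD t 0) : Int), (t : Int)) ∉ as := by
          intro hc
          have := has _ hc
          simp at this
          have ht' : m ≤ (hs.count (hs[t]?.getD 0) : Int) := by simpa using ht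
          omega
        have hwcons : ((hs.count (hs.getD t 0) : Int), (t : Int)) ∈ x₀ :: bs := by
          rw [hsplit] at hwin
          rcases List.mem_append.mp hwin with hc | hc
          · exact absurd hc hwnotas
          · exact hc
        rcases List.mem_cons.mp hwcons with heq | hbs
        · rw [← heq]
        · have hpw := pvSorted2_pairwise
            ((PySem.List.enumerate hs 0).foldl pvStepA PySem.Dict.empty).values
          rw [← hl'def, hsplit] at hpw
          have := (List.pairwise_append.mp hpw).2.1
          rw [List.pairwise_cons] at this
          exact this.1 _ hbs
      have : x₀.2 = (t : Int) := le_antisymm hx₀2le hx₀2ge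
      simp [this]
  · push_neg at hex
    have hRHS : (PySem.List.pyRange ((hs.length : Int) - 1) (-1) (-1)).find?
          (fun i => decide ((hs.foldl (fun d h => d.insert h (d.getD h 0 + 1)) PySem.Dict.empty).getD
            (PySem.List.pyGetD hs i 0) 0 ≥ m)) = none := by
      rw [List.find?_eq_none]
      intro x hx
      rw [PySem.List.mem_pyRange_neg_one] at hx
      rw [PySem.List.pyGetD_of_nonneg _ _ (by omega)]
      simp only [hcnt]
      have := hex x.toNat (by omega)
      simpa using this
    rw [hRHS, Option.map_eq_none_iff, List.find?_eq_none]
    intro x hxmem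
    have hxv : x ∈ ((PySem.List.enumerate hs 0).foldl pvStepA PySem.Dict.empty).values := by
      have := (PySem.List.sorted2_perm
        ((PySem.List.enumerate hs 0).foldl pvStepA PySem.Dict.empty).values
        (fun x => x.2) (fun x => x.1) true).mem_iff (a := x)
      rw [hl'def] at hxmem
      rwa [this] at hxmem
    obtain ⟨h, hhmem, hx⟩ := pvValues_mem hs x hxv
    obtain ⟨t, htn, _, hg, _⟩ := pvLast_spec hs h hhmem
    have := hex t htn
    rw [hg] at this
    rw [hx]
    simpa using this

-- ===== VERDICT (by name: the statement is the Claim_ definition above) =====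
theorem try_py_spec : Claim_equal_try_py := by
  intro s k m b p _ hpre
  obtain ⟨h1, _⟩ := hpre
  have hk0 : 0 ≤ k := by rcases h1 with h | h <;> omega
  unfold Spec_try_py try_py try_py_alt
  rw [pvHashesEq s.toList k b p h1, ← pvWindowHashesEq s.toList k b p hk0]
  exact pvMain _ m
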